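-- pv_equiv track=rewrite | github.com/elikk2018-cmd/project-2_elizarov_M25-555 | src/primitive_db/parser.py | parse_values
-- ===== SOURCE A (Python) =====
-- def parse_values(values_str):
--     """
--     Парсит значения из строки вида '(value1, value2, value3)'.
--     """
--     if values_str.startswith('(') and values_str.endswith(')'):
--         values_str = values_str[1:-1]
--
--     values = []
--     current_value = ""
--     in_quotes = False
--     quote_char = None
--
--     for char in values_str:
--         if char in ['"', "'"] and not in_quotes:
--             in_quotes = True
--             quote_char = char
--             current_value += char
--         elif char == quote_char and in_quotes:
--             in_quotes = False
--             current_value += char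
--         elif char == ',' and not in_quotes:
--             values.append(current_value.strip())
--             current_value = ""
--         else:
--             current_value += char
--
--     if current_value:
--         values.append(current_value.strip())
--
--     return values
-- ===== SOURCE B (Python) =====
-- def _next_comma(s):
--     """Index of the first top-level comma of s (one outside quotes), or None."""
--     in_quotes = False
--     quote_char = None
--     for i, ch in enumerate(s):
--         if ch in ('"', "'") and not in_quotes:
--             in_quotes = True
--             quote_char = ch
--         elif ch == quote_char and in_quotes:
--             in_quotes = False
--         elif ch == ',' and not in_quotes:
--             return i
--     return None
--
--
-- def _collect(s):
--     i = _next_comma(s)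
--     if i is None:
--         return [s.strip()] if s else []
--     return [s[:i].strip()] + _collect(s[i + 1:])
--
--
-- def parse_values(values_str):
--     if values_str.startswith('(') and values_str.endswith(')'):
--         values_str = values_str[1:-1]
--     return _collect(values_str)
-- ===== Notes on version B (the rewrite author's own statement) =====
-- stated objective: alternative
-- what changed: Replaced A's single left-to-right accumulator state machine (building each value char by char in one fold) by a recursive splitter: a helper scans for the index of the next top-level comma, the string is sliced there and stripped, and the function recurses on the remainder.
import Mathlib
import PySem

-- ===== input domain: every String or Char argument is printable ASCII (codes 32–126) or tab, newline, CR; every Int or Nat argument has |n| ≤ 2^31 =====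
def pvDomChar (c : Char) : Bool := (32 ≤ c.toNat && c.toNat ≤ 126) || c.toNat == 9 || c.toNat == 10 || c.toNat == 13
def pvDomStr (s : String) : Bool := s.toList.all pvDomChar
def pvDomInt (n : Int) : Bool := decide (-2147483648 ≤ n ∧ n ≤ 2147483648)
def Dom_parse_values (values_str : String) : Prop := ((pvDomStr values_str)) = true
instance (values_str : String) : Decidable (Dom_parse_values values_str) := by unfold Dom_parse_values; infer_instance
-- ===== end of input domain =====

-- B replaces A's single accumulator state machine by a recursive splitter that finds the
-- next top-level comma with a helper scan and slices the string there; objective: alternative decomposition.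


-- ===== PORT A =====
-- one step of A's for-loop: state is (values, current_value, in_quotes, quote_char)
def pvStepA (st : List String × List Char × Bool × Option Char) (char : Char) :
    List String × List Char × Bool × Option Char :=
  let (values, current_value, in_quotes, quote_char) := st
  if (char = '"' ∨ char = '\'') ∧ in_quotes = false then
    (values, current_value ++ [char], true, some char)
  else if some char = quote_char ∧ in_quotes = true then
    (values, current_value ++ [char], false, quote_char)
  else if char = ',' ∧ in_quotes = false then
    (values ++ [String.ofList (PySem.Chars.strip current_value)], [], in_quotes, quote_char)
  else
    (values, current_value ++ [char], in_quotes, quote_char)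

-- A's trailing 'if current_value: values.append(current_value.strip())'
def pvFinishA (st : List String × List Char × Bool × Option Char) : List String :=
  if st.2.1 ≠ [] then st.1 ++ [String.ofList (PySem.Chars.strip st.2.1)] else st.1

def parse_values (values_str : String) : List String :=
  let values_str :=
    if PySem.Str.startswith values_str "(" && PySem.Str.endswith values_str ")" then
      PySem.Str.slice values_str (some 1) (some (-1))
    else values_str
  pvFinishA (values_str.toList.foldl pvStepA ([], [], false, none))

-- ===== PORT B =====
-- _next_comma: index of the first top-level comma, or none (counter i carried as in enumerate)
def pvNextComma : List Char → Nat → Bool → Option Char → Option Nat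
  | [], _, _, _ => none
  | ch :: rest, i, in_quotes, quote_char =>
    if (ch = '"' ∨ ch = '\'') ∧ in_quotes = false then
      pvNextComma rest (i + 1) true (some ch)
    else if some ch = quote_char ∧ in_quotes = true then
      pvNextComma rest (i + 1) false quote_char
    else if ch = ',' ∧ in_quotes = false then
      some i
    else
      pvNextComma rest (i + 1) in_quotes quote_char

-- termination bound for _collect's recursion (cited by the port's decreasing_by)
theorem pvNextComma_bound : ∀ (cs : List Char) (i : Nat) (inq : Bool) (qc : Option Char) (j : Nat),
    pvNextComma cs i inq qc = some j → i ≤ j ∧ j - i < cs.length := by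
  intro cs
  induction cs with
  | nil => intro i inq qc j h; simp [pvNextComma] at h
  | cons c rest ih =>
    intro i inq qc j h
    simp only [pvNextComma] at h
    split_ifs at h with h1 h2 h3
    · have := ih (i+1) true (some c) j h; simp only [List.length_cons]; omega
    · have := ih (i+1) false qc j h; simp only [List.length_cons]; omega
    · cases h; simp only [List.length_cons]; omega
    · have := ih (i+1) inq qc j h; simp only [List.length_cons]; omega

-- _collect
def pvCollect (s : String) : List String :=
  match h : pvNextComma s.toList 0 false none with
  | none => if s ≠ "" then [PySem.Str.strip s] else []
  | some i =>
      PySem.Str.strip (PySem.Str.slice s none (some (i : Int))) ::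
        pvCollect (PySem.Str.slice s (some ((i : Int) + 1)) none)
termination_by s.toList.length
decreasing_by
  have hb := pvNextComma_bound s.toList 0 false none i h
  have h2 : (PySem.Str.slice s (some ((i : Int) + 1)) none).toList = s.toList.drop (i + 1) := by
    rw [show ((i : Int) + 1) = ((i + 1 : Nat) : Int) from by push_cast; ring,
        PySem.Str.toList_slice, PySem.Chars.slice, PySem.List.slice_from_natCast]
  rw [h2]
  simp only [List.length_drop]
  omega

def parse_values_alt (values_str : String) : List String :=
  let values_str :=
    if PySem.Str.startswith values_str "(" && PySem.Str.endswith values_str ")" then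
      PySem.Str.slice values_str (some 1) (some (-1))
    else values_str
  pvCollect values_str

-- ===== PRECONDITION & SPEC =====
def Spec_parse_values (values_str : String) (out : List String) : Prop := out = parse_values_alt values_str
instance (values_str : String) (out : List String) : Decidable (Spec_parse_values values_str out) := by unfold Spec_parse_values; infer_instance

-- ===== CLAIM (what is proved, stated in full; the proofs are below) =====
def Claim_equal_parse_values : Prop := ∀ (values_str : String), Dom_parse_values values_str → Spec_parse_values values_str (parse_values values_str)

-- ===== LEMMAS AND PROOFS =====

-- raw comma-free segments of a suffix, given scanner state: (first segment, later segments)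
def pvSegs : List Char → Bool → Option Char → List Char × List (List Char)
  | [], _, _ => ([], [])
  | c :: cs, inq, qc =>
    if (c = '"' ∨ c = '\'') ∧ inq = false then
      ((c :: (pvSegs cs true (some c)).1), (pvSegs cs true (some c)).2)
    else if some c = qc ∧ inq = true then
      ((c :: (pvSegs cs false qc).1), (pvSegs cs false qc).2)
    else if c = ',' ∧ inq = false then
      ([], (pvSegs cs inq qc).1 :: (pvSegs cs inq qc).2)
    else
      ((c :: (pvSegs cs inq qc).1), (pvSegs cs inq qc).2)

-- strip every segment; drop the last when its raw form is empty
def pvF : List Char → List (List Char) → List String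
  | h, [] => if h ≠ [] then [String.ofList (PySem.Chars.strip h)] else []
  | h, t0 :: ts => String.ofList (PySem.Chars.strip h) :: pvF t0 ts

theorem pvSegs_false_irrel : ∀ (cs : List Char) (qc qc' : Option Char),
    pvSegs cs false qc = pvSegs cs false qc' := by
  intro cs
  induction cs with
  | nil => intro qc qc'; rfl
  | cons c rest ih =>
    intro qc qc'
    simp only [pvSegs]
    split_ifs with h1 h2 h2' h3 h3' <;> simp_all [ih qc qc']

theorem pvFoldA_eq : ∀ (cs : List Char) (values : List String) (cur : List Char)
    (inq : Bool) (qc : Option Char),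
    pvFinishA (cs.foldl pvStepA (values, cur, inq, qc)) =
      values ++ pvF (cur ++ (pvSegs cs inq qc).1) (pvSegs cs inq qc).2 := by
  intro cs
  induction cs with
  | nil =>
    intro values cur inq qc
    simp only [List.foldl_nil, pvSegs, List.append_nil, pvF, pvFinishA]
    split_ifs <;> simp
  | cons c rest ih =>
    intro values cur inq qc
    rw [List.foldl_cons]
    by_cases h1 : (c = '"' ∨ c = '\'') ∧ inq = false
    · rw [show pvStepA (values, cur, inq, qc) c = (values, cur ++ [c], true, some c) from by
        simp [pvStepA, h1]]
      rw [ih]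
      simp [pvSegs, h1, List.append_assoc]
    · by_cases h2 : some c = qc ∧ inq = true
      · rw [show pvStepA (values, cur, inq, qc) c = (values, cur ++ [c], false, qc) from by
          simp [pvStepA, h2]]
        rw [ih]
        have hq : pvSegs rest false qc = pvSegs rest false none := pvSegs_false_irrel rest qc none
        simp [pvSegs, h2, hq, List.append_assoc]
      · by_cases h3 : c = ',' ∧ inq = false
        · rw [show pvStepA (values, cur, inq, qc) c =
              (values ++ [String.ofList (PySem.Chars.strip cur)], [], inq, qc) from by
            simp [pvStepA, h3]]
          rw [ih]
          simp [pvSegs, h3, pvF, List.append_assoc]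
        · rw [show pvStepA (values, cur, inq, qc) c = (values, cur ++ [c], inq, qc) from by
            simp [pvStepA, h1, h2, h3]]
          rw [ih]
          simp [pvSegs, h1, h2, h3, List.append_assoc]

-- pvNextComma locates the first segment boundary of pvSegs
theorem pvNextComma_segs : ∀ (cs : List Char) (i : Nat) (inq : Bool) (qc : Option Char),
    (pvNextComma cs i inq qc = none → pvSegs cs inq qc = (cs, [])) ∧
    (∀ j, pvNextComma cs i inq qc = some j →
      i ≤ j ∧ j - i < cs.length ∧
      pvSegs cs inq qc =
        (cs.take (j - i), ((pvSegs (cs.drop (j - i + 1)) false none).1 ::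
                           (pvSegs (cs.drop (j - i + 1)) false none).2))) := by
  intro cs
  induction cs with
  | nil =>
    intro i inq qc
    constructor
    · intro _; rfl
    · intro j h; simp [pvNextComma] at h
  | cons c rest ih =>
    intro i inq qc
    constructor
    · intro h
      simp only [pvNextComma] at h
      simp only [pvSegs]
      split_ifs at h ⊢ with h1 h2 h3
      · rw [(ih (i+1) true (some c)).1 h]
      · rw [(ih (i+1) false qc).1 h]
      · rw [(ih (i+1) inq qc).1 h]
    · intro j h
      simp only [pvNextComma] at h
      simp only [pvSegs]
      split_ifs at h ⊢ with h1 h2 h3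
      · obtain ⟨hle, hlt, hs⟩ := (ih (i+1) true (some c)).2 j h
        refine ⟨by omega, by simp only [List.length_cons]; omega, ?_⟩
        rw [hs]
        rw [show j - i = (j - (i+1)) + 1 from by omega]
        simp
      · obtain ⟨hle, hlt, hs⟩ := (ih (i+1) false qc).2 j h
        refine ⟨by omega, by simp only [List.length_cons]; omega, ?_⟩
        rw [hs]
        rw [show j - i = (j - (i+1)) + 1 from by omega]
        simp
      · cases h
        refine ⟨le_refl _, by simp, ?_⟩
        simp only [Nat.sub_self, List.take_zero, Nat.zero_add, List.drop_succ_cons, List.drop_zero]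
        have hinq : inq = false := h3.2
        subst hinq
        rw [pvSegs_false_irrel rest qc none]
      · obtain ⟨hle, hlt, hs⟩ := (ih (i+1) inq qc).2 j h
        refine ⟨by omega, by simp only [List.length_cons]; omega, ?_⟩
        rw [hs]
        rw [show j - i = (j - (i+1)) + 1 from by omega]
        simp

theorem pvCollect_eq (s : String) :
    pvCollect s = pvF (pvSegs s.toList false none).1 (pvSegs s.toList false none).2 := by
  rw [pvCollect]
  cases h : pvNextComma s.toList 0 false none with
  | none =>
    rw [(pvNextComma_segs s.toList 0 false none).1 h]
    simp only [pvF]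
    by_cases hs : s = ""
    · subst hs; simp
    · have hl : s.toList ≠ [] := by simpa using hs
      have hstrip : PySem.Str.strip s = String.ofList (PySem.Chars.strip s.toList) :=
        String.ext (by simp [PySem.Str.strip])
      simp [hs, hl, hstrip]
  | some i =>
    obtain ⟨-, hlt, hs⟩ := (pvNextComma_segs s.toList 0 false none).2 i h
    simp only [Nat.sub_zero] at hs hlt
    rw [hs]
    simp only [pvF]
    have htake : (PySem.Str.slice s none (some (i : Int))).toList = s.toList.take i := by
      rw [PySem.Str.toList_slice, PySem.Chars.slice, PySem.List.slice_to_natCast]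
    have hdrop : (PySem.Str.slice s (some ((i : Int) + 1)) none).toList = s.toList.drop (i + 1) := by
      rw [show ((i : Int) + 1) = ((i + 1 : Nat) : Int) from by push_cast; ring,
          PySem.Str.toList_slice, PySem.Chars.slice, PySem.List.slice_from_natCast]
    refine congrArg₂ (· :: ·) ?_ ?_
    · exact String.ext (by simp [PySem.Str.strip, htake])
    · rw [pvCollect_eq (PySem.Str.slice s (some ((i : Int) + 1)) none), hdrop]
termination_by s.toList.length
decreasing_by
  have h2 : (PySem.Str.slice s (some ((i : Int) + 1)) none).toList = s.toList.drop (i + 1) := by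
    rw [show ((i : Int) + 1) = ((i + 1 : Nat) : Int) from by push_cast; ring,
        PySem.Str.toList_slice, PySem.Chars.slice, PySem.List.slice_from_natCast]
  rw [h2]
  simp only [List.length_drop]
  omega

-- ===== VERDICT (by name: the statement is the Claim_ definition above) =====
theorem pvMain_aux (t : String) :
    pvFinishA (t.toList.foldl pvStepA ([], [], false, none)) = pvCollect t := by
  have hA := pvFoldA_eq t.toList [] [] false none
  simp only [List.nil_append] at hA
  rw [hA, pvCollect_eq]

theorem parse_values_spec : Claim_equal_parse_values := by
  intro s _
  unfold Spec_parse_values parse_values parse_values_alt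
  exact (pvMain_aux _).symm ▸ rfl
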